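-- pv_equiv track=rewrite | github.com/JaikishoreKC/omnichannel-agentic-ai-commerce | backend/app/api/routes/ws_route.py | _stream_text_chunks
-- ===== SOURCE A (Python) =====
-- def _stream_text_chunks(text: str, max_chars: int = 28) -> list[str]:
--     cleaned = text.strip()
--     if not cleaned:
--         return []
--     words = cleaned.split()
--     if not words:
--         return [cleaned[:max_chars]]
--     chunks: list[str] = []
--     current = ""
--     for word in words:
--         candidate = word if not current else f"{current} {word}"
--         if len(candidate) <= max_chars:
--             current = candidate
--             continue
--         if current:
--             chunks.append(current + " ")
--         current = word
--     if current:
--         chunks.append(current)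
--     return chunks
-- ===== SOURCE B (Python) =====
-- def _stream_text_chunks(text: str, max_chars: int = 28) -> list[str]:
--     words = text.split()
--     n = len(words)
--     pieces: list[str] = []
--     i = 0
--     while i < n:
--         # maximal run words[i:j] whose single-space join fits in max_chars
--         j = i + 1
--         length = len(words[i])
--         while j < n and length + 1 + len(words[j]) <= max_chars:
--             length += 1 + len(words[j])
--             j += 1
--         if pieces:
--             pieces[-1] += " "  # another chunk follows, so the previous one gets its space
--         pieces.append(" ".join(words[i:j]))
--         i = j
--     return pieces
-- ===== Notes on version B (the rewrite author's own statement) =====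
-- stated objective: alternative
-- what changed: B replaces A's single fold that carries and rebuilds a growing chunk string word by word with an outer loop over chunk boundaries: for each start index an inner scan finds the maximal run of words whose single-space join fits max_chars, the chunk is built once by joining that slice, and the trailing space is appended to the previous chunk only when a following chunk begins.
import Mathlib
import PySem

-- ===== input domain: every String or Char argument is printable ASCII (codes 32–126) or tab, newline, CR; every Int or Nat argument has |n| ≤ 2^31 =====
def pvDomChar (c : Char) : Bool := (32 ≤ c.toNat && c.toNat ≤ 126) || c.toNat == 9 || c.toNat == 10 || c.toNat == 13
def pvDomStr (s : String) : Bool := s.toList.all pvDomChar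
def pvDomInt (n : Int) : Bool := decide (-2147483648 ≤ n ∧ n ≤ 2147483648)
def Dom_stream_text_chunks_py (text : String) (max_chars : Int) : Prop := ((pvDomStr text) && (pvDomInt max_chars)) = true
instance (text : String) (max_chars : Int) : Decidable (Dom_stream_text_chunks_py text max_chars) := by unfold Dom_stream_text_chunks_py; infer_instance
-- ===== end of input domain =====

-- B replaces A's single fold that rebuilds a growing chunk string word by word with an
-- outer loop over chunk boundaries: an inner scan finds the maximal run of words whose
-- join fits, the chunk is joined once from that run, and the trailing space is added to
-- the previous chunk when a following one starts (objective: alternative).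


-- ===== PORT A =====
-- A's loop body: state is (chunks, current); `candidate` is rebuilt from the current string.
def pvStepA (max_chars : Int) (st : List (List Char) × List Char) (word : List Char) :
    List (List Char) × List Char :=
  let candidate := if st.2 = [] then word else st.2 ++ [' '] ++ word
  if (candidate.length : Int) ≤ max_chars then (st.1, candidate)
  else if st.2 = [] then (st.1, word)
  else (st.1 ++ [st.2 ++ [' ']], word)

def stream_text_chunks_py (text : String) (max_chars : Int) : List String :=
  let cleaned := PySem.Chars.strip text.toList
  if cleaned = [] then []
  else
    let words := PySem.Chars.split₀ cleaned
    if words = [] then [String.ofList (PySem.Chars.slice cleaned none (some max_chars))]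
    else
      let st := words.foldl (pvStepA max_chars) ([], [])
      (if st.2 = [] then st.1 else st.1 ++ [st.2]).map String.ofList

-- ===== PORT B =====
-- B's inner while loop: consume the maximal run of further words that still fits the
-- running length; returns (run, remaining words) — the port's form of (words[i:j], words[j:]).
def pvExtend (max_chars : Int) : Int → List (List Char) → List (List Char) × List (List Char)
  | _, [] => ([], [])
  | len, w :: ws =>
    if len + 1 + (w.length : Int) ≤ max_chars then
      let p := pvExtend max_chars (len + 1 + (w.length : Int)) ws
      (w :: p.1, p.2)
    else ([], w :: ws)

theorem pvExtend_snd_length (max_chars : Int) :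
    ∀ (len : Int) (ws : List (List Char)), (pvExtend max_chars len ws).2.length ≤ ws.length := by
  intro len ws
  induction ws generalizing len with
  | nil => simp [pvExtend]
  | cons w ws ih =>
    simp only [pvExtend]
    split
    · exact Nat.le_succ_of_le (ih _)
    · simp

-- `pieces[-1] += " "`: add the trailing space to the last piece collected so far.
def pvBump (acc : List (List Char)) : List (List Char) :=
  if acc = [] then [] else acc.dropLast ++ [acc.getLastD [] ++ [' ']]

-- B's outer while loop over chunk starts, recursing on the remaining words.
def pvOuter (max_chars : Int) (acc : List (List Char)) : List (List Char) → List (List Char)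
  | [] => acc
  | w :: ws =>
    let e := pvExtend max_chars (w.length : Int) ws
    pvOuter max_chars (pvBump acc ++ [PySem.Chars.join [' '] (w :: e.1)]) e.2
  termination_by ws => ws.length
  decreasing_by exact Nat.lt_succ_of_le (pvExtend_snd_length max_chars _ ws)

def stream_text_chunks_py_alt (text : String) (max_chars : Int) : List String :=
  (pvOuter max_chars [] (PySem.Chars.split₀ text.toList)).map String.ofList

-- ===== PRECONDITION & SPEC =====
def Spec_stream_text_chunks_py (text : String) (max_chars : Int) (out : List String) : Prop := out = stream_text_chunks_py_alt text max_chars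
instance (text : String) (max_chars : Int) (out : List String) : Decidable (Spec_stream_text_chunks_py text max_chars out) := by unfold Spec_stream_text_chunks_py; infer_instance

-- ===== CLAIM (what is proved, stated in full; the proofs are below) =====
def Claim_equal_stream_text_chunks_py : Prop := ∀ (text : String) (max_chars : Int), Dom_stream_text_chunks_py text max_chars → Spec_stream_text_chunks_py text max_chars (stream_text_chunks_py text max_chars)

-- ===== LEMMAS AND PROOFS =====

-- split₀.go over an all-space list only flushes the pending word
theorem pv_go_allspace (t : List Char) (ht : ∀ c ∈ t, PySem.Chars.isspace c = true) :
    ∀ cur acc, PySem.Chars.split₀.go t cur acc = PySem.Chars.split₀.go [] cur acc := by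
  induction t with
  | nil => intro cur acc; rfl
  | cons c t ih =>
    intro cur acc
    have hc : PySem.Chars.isspace c = true := ht c (List.mem_cons_self ..)
    have ht' : ∀ c ∈ t, PySem.Chars.isspace c = true := fun c hc => ht c (List.mem_cons_of_mem _ hc)
    by_cases hcur : cur = []
    · simp only [PySem.Chars.split₀.go, hc, if_true, List.isEmpty_iff, hcur, ite_true]
      exact ih ht' [] acc
    · simp only [PySem.Chars.split₀.go, hc, if_true, List.isEmpty_iff, hcur, ite_true, ite_false]
      rw [ih ht' [] (cur.reverse :: acc)]
      rfl

-- appending all-space trailing characters does not change split₀.go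
theorem pv_go_append_allspace (t : List Char) (ht : ∀ c ∈ t, PySem.Chars.isspace c = true) :
    ∀ (s : List Char) (cur acc : _), PySem.Chars.split₀.go (s ++ t) cur acc = PySem.Chars.split₀.go s cur acc := by
  intro s
  induction s with
  | nil => intro cur acc; exact pv_go_allspace t ht cur acc
  | cons c s ih =>
    intro cur acc
    by_cases hc : PySem.Chars.isspace c = true <;>
      by_cases hcur : cur = [] <;>
        simp [PySem.Chars.split₀.go, hc, List.isEmpty_iff, hcur, ih]

-- split₀.go never returns [] once a word or a chunk is pending
theorem pv_go_ne_nil (s : List Char) : ∀ cur acc, (cur ≠ [] ∨ acc ≠ []) →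
    PySem.Chars.split₀.go s cur acc ≠ [] := by
  induction s with
  | nil =>
    intro cur acc h
    by_cases hcur : cur = []
    · simp only [PySem.Chars.split₀.go, List.isEmpty_iff, hcur, ite_true]
      simp only [hcur] at h
      simpa using h
    · simp [PySem.Chars.split₀.go, List.isEmpty_iff, hcur]
  | cons c s ih =>
    intro cur acc h
    by_cases hc : PySem.Chars.isspace c = true
    · by_cases hcur : cur = []
      · simp only [PySem.Chars.split₀.go, hc, if_true, List.isEmpty_iff, hcur, ite_true]
        refine ih [] acc (Or.inr ?_)
        simp only [hcur] at h; simpa using h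
      · simp only [PySem.Chars.split₀.go, hc, if_true, List.isEmpty_iff, hcur, ite_true, ite_false]
        exact ih [] (cur.reverse :: acc) (Or.inr (by simp))
    · simp only [PySem.Chars.split₀.go, hc, ite_false, if_false, Bool.false_eq_true]
      exact ih (c :: cur) acc (Or.inl (by simp))

-- every word produced by split₀.go is nonempty (given nonempty accumulated words)
theorem pv_go_words_ne_nil (s : List Char) : ∀ cur acc, (∀ w ∈ acc, w ≠ []) →
    ∀ w ∈ PySem.Chars.split₀.go s cur acc, w ≠ [] := by
  induction s with
  | nil =>
    intro cur acc hacc w hw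
    by_cases hcur : cur = []
    · simp only [PySem.Chars.split₀.go, List.isEmpty_iff, hcur, ite_true] at hw
      exact hacc w (List.mem_reverse.mp hw)
    · simp only [PySem.Chars.split₀.go, List.isEmpty_iff, hcur, ite_false] at hw
      rcases List.mem_cons.mp (List.mem_reverse.mp hw) with h | h
      · subst h; simpa using hcur
      · exact hacc w h
  | cons c s ih =>
    intro cur acc hacc w hw
    by_cases hc : PySem.Chars.isspace c = true
    · by_cases hcur : cur = []
      · simp only [PySem.Chars.split₀.go, hc, if_true, List.isEmpty_iff, hcur, ite_true] at hw
        exact ih [] acc hacc w hw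
      · simp only [PySem.Chars.split₀.go, hc, if_true, List.isEmpty_iff, hcur, ite_true,
          ite_false] at hw
        refine ih [] (cur.reverse :: acc) ?_ w hw
        intro v hv
        rcases List.mem_cons.mp hv with h | h
        · subst h; simpa using hcur
        · exact hacc v h
    · simp only [PySem.Chars.split₀.go, hc, ite_false, Bool.false_eq_true, if_false] at hw
      exact ih (c :: cur) acc hacc w hw

theorem pv_words_ne_nil (s : List Char) : ∀ w ∈ PySem.Chars.split₀ s, w ≠ [] := by
  intro w hw
  exact pv_go_words_ne_nil s [] [] (by simp) w hw

-- leading whitespace does not change split₀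
theorem pv_split₀_lstrip (s : List Char) :
    PySem.Chars.split₀ (PySem.Chars.lstrip s) = PySem.Chars.split₀ s := by
  induction s with
  | nil => rfl
  | cons c s ih =>
    by_cases hc : PySem.Chars.isspace c = true
    · have h1 : PySem.Chars.lstrip (c :: s) = PySem.Chars.lstrip s := by
        simp [PySem.Chars.lstrip, List.dropWhile_cons, hc]
      have h2 : PySem.Chars.split₀ (c :: s) = PySem.Chars.split₀ s := by
        simp [PySem.Chars.split₀, PySem.Chars.split₀.go, hc]
      rw [h1, h2, ih]
    · simp [PySem.Chars.lstrip, List.dropWhile_cons, hc]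

-- trailing whitespace does not change split₀
theorem pv_split₀_rstrip (s : List Char) :
    PySem.Chars.split₀ (PySem.Chars.rstrip s) = PySem.Chars.split₀ s := by
  have hdecomp : PySem.Chars.rstrip s ++ (s.reverse.takeWhile PySem.Chars.isspace).reverse = s := by
    have h := List.takeWhile_append_dropWhile (p := PySem.Chars.isspace) (l := s.reverse)
    show (s.reverse.dropWhile PySem.Chars.isspace).reverse ++ _ = s
    rw [← List.reverse_append, h, List.reverse_reverse]
  have hsp : ∀ c ∈ (s.reverse.takeWhile PySem.Chars.isspace).reverse, PySem.Chars.isspace c = true := by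
    intro c hc
    exact List.mem_takeWhile_imp (List.mem_reverse.mp hc)
  conv_rhs => rw [← hdecomp]
  exact (pv_go_append_allspace _ hsp _ [] []).symm

theorem pv_split₀_strip (s : List Char) :
    PySem.Chars.split₀ (PySem.Chars.strip s) = PySem.Chars.split₀ s := by
  show PySem.Chars.split₀ (PySem.Chars.rstrip (PySem.Chars.lstrip s)) = _
  rw [pv_split₀_rstrip, pv_split₀_lstrip]

theorem pv_strip_eq_nil_iff (s : List Char) :
    PySem.Chars.strip s = [] ↔ ∀ c ∈ s, PySem.Chars.isspace c = true := by
  constructor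
  · intro h c hc
    have h1 : PySem.Chars.rstrip (PySem.Chars.lstrip s) = [] := h
    have h2 : ∀ c ∈ PySem.Chars.lstrip s, PySem.Chars.isspace c = true := by
      intro c hc
      have : (PySem.Chars.lstrip s).reverse.dropWhile PySem.Chars.isspace = [] := by
        have := congrArg List.reverse h1
        simpa [PySem.Chars.rstrip] using this
      have := List.dropWhile_eq_nil_iff.mp this (x := c) (by simpa using hc)
      exact this
    have hs : s = s.takeWhile PySem.Chars.isspace ++ PySem.Chars.lstrip s := by
      simp [PySem.Chars.lstrip]
    rw [hs] at hc
    rcases List.mem_append.mp hc with h | h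
    · exact List.mem_takeWhile_imp h
    · exact h2 c h
  · intro h
    have h1 : PySem.Chars.lstrip s = [] := by
      simp only [PySem.Chars.lstrip]
      exact List.dropWhile_eq_nil_iff.mpr (fun x hx => h x hx)
    show PySem.Chars.rstrip (PySem.Chars.lstrip s) = []
    rw [h1]; rfl

theorem pv_split₀_eq_nil_iff (s : List Char) :
    PySem.Chars.split₀ s = [] ↔ ∀ c ∈ s, PySem.Chars.isspace c = true := by
  constructor
  · induction s with
    | nil => intro _ c hc; cases hc
    | cons c s ih =>
      intro h d hd
      by_cases hc : PySem.Chars.isspace c = true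
      · have h' : PySem.Chars.split₀ s = [] := by
          simpa [PySem.Chars.split₀, PySem.Chars.split₀.go, hc] using h
        rcases List.mem_cons.mp hd with hd | hd
        · subst hd; exact hc
        · exact ih h' d hd
      · exfalso
        have : PySem.Chars.split₀.go s [c] [] ≠ [] := pv_go_ne_nil s [c] [] (Or.inl (by simp))
        exact this (by simpa [PySem.Chars.split₀, PySem.Chars.split₀.go, hc] using h)
  · intro h
    have := pv_go_allspace s h [] []
    simpa [PySem.Chars.split₀] using this

-- joined group facts
theorem pv_join_append (g : List (List Char)) (w : List Char) (hg : g ≠ []) :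
    PySem.Chars.join [' '] (g ++ [w]) = PySem.Chars.join [' '] g ++ [' '] ++ w := by
  induction g with
  | nil => exact absurd rfl hg
  | cons x t ih =>
    cases t with
    | nil => simp [PySem.Chars.join_singleton, PySem.Chars.join_cons_cons]
    | cons y t' =>
      simp only [List.cons_append]
      rw [PySem.Chars.join_cons_cons]
      rw [show y :: (t' ++ [w]) = (y :: t') ++ [w] from by simp]
      rw [ih (by simp), PySem.Chars.join_cons_cons]
      simp [List.append_assoc]

theorem pv_join_ne_nil (g : List (List Char)) (hg : g ≠ []) (hw : ∀ w ∈ g, w ≠ []) :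
    PySem.Chars.join [' '] g ≠ [] := by
  cases g with
  | nil => exact absurd rfl hg
  | cons x t =>
    cases t with
    | nil => simpa [PySem.Chars.join_singleton] using hw x (by simp)
    | cons y t' =>
      rw [PySem.Chars.join_cons_cons]
      simp

theorem pv_bump_concat (l : List (List Char)) (x : List Char) :
    pvBump (l ++ [x]) = l ++ [x ++ [' ']] := by
  simp [pvBump, List.dropLast_concat, List.getLastD_concat]

-- the bridge: A's fold, resumed with collected chunks `pvBump acc` and an open group `grp`,
-- lands exactly where B's outer loop lands after extending `grp` maximally.
theorem pv_bridge (m : Int) (ws : List (List Char)) :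
    ∀ (acc grp : List (List Char)), grp ≠ [] → (∀ v ∈ grp, v ≠ []) → (∀ v ∈ ws, v ≠ []) →
    (let st := ws.foldl (pvStepA m) (pvBump acc, PySem.Chars.join [' '] grp)
     if st.2 = [] then st.1 else st.1 ++ [st.2])
    = pvOuter m (pvBump acc ++ [PySem.Chars.join [' ']
        (grp ++ (pvExtend m ((PySem.Chars.join [' '] grp).length : Int) ws).1)])
        ((pvExtend m ((PySem.Chars.join [' '] grp).length : Int) ws).2) := by
  induction ws with
  | nil =>
    intro acc grp hg hgw _
    have hJ : PySem.Chars.join [' '] grp ≠ [] := pv_join_ne_nil grp hg hgw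
    simp [pvExtend, pvOuter, hJ]
  | cons w ws ih =>
    intro acc grp hg hgw hws
    have hJ : PySem.Chars.join [' '] grp ≠ [] := pv_join_ne_nil grp hg hgw
    have hwne : w ≠ [] := hws w (by simp)
    have hrest : ∀ v ∈ ws, v ≠ [] := fun v hv => hws v (List.mem_cons_of_mem _ hv)
    have hlen : ((PySem.Chars.join [' '] grp ++ [' '] ++ w).length : Int)
        = ((PySem.Chars.join [' '] grp).length : Int) + 1 + (w.length : Int) := by
      simp only [List.length_append, List.length_cons, List.length_nil]
      push_cast; ring
    by_cases hle : ((PySem.Chars.join [' '] grp).length : Int) + 1 + (w.length : Int) ≤ m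
    · -- word fits: A extends current, B's pvExtend takes it
      have hA : pvStepA m (pvBump acc, PySem.Chars.join [' '] grp) w
          = (pvBump acc, PySem.Chars.join [' '] (grp ++ [w])) := by
        simp only [pvStepA, if_neg hJ]
        rw [if_pos (by rw [hlen]; exact hle), pv_join_append grp w hg]
      have hE : pvExtend m ((PySem.Chars.join [' '] grp).length : Int) (w :: ws)
          = ((w :: (pvExtend m (((PySem.Chars.join [' '] grp).length : Int) + 1 + (w.length : Int)) ws).1),
             (pvExtend m (((PySem.Chars.join [' '] grp).length : Int) + 1 + (w.length : Int)) ws).2) := by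
        simp [pvExtend, hle]
      have hlen2 : ((PySem.Chars.join [' '] (grp ++ [w])).length : Int)
          = ((PySem.Chars.join [' '] grp).length : Int) + 1 + (w.length : Int) := by
        rw [pv_join_append grp w hg]; exact hlen
      have := ih acc (grp ++ [w]) (by simp)
        (fun v hv => by
          rcases List.mem_append.mp hv with h | h
          · exact hgw v h
          · simpa using (by simpa using h : v = w) ▸ hwne) hrest
      rw [List.foldl_cons, hA, hE]
      rw [hlen2] at this
      simpa [List.append_assoc] using this
    · -- word does not fit: A flushes, B closes the run and starts a new chunk
      have hA : pvStepA m (pvBump acc, PySem.Chars.join [' '] grp) w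
          = (pvBump acc ++ [PySem.Chars.join [' '] grp ++ [' ']], w) := by
        simp only [pvStepA, if_neg hJ]
        rw [if_neg (by rw [hlen]; exact hle)]
      have hE : pvExtend m ((PySem.Chars.join [' '] grp).length : Int) (w :: ws)
          = ([], w :: ws) := by
        simp [pvExtend, hle]
      have hbump : pvBump (pvBump acc ++ [PySem.Chars.join [' '] grp])
          = pvBump acc ++ [PySem.Chars.join [' '] grp ++ [' ']] :=
        pv_bump_concat _ _
      have := ih (pvBump acc ++ [PySem.Chars.join [' '] grp]) [w] (by simp)
        (by simpa using hwne) hrest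
      rw [List.foldl_cons, hA, hE, ← hbump]
      simp only [PySem.Chars.join_singleton] at this
      rw [this]
      simp [pvOuter, List.append_nil, PySem.Chars.join_singleton]

-- ===== VERDICT (by name: the statement is the Claim_ definition above) =====
theorem stream_text_chunks_py_spec : Claim_equal_stream_text_chunks_py := by
  intro text m _
  show stream_text_chunks_py text m = stream_text_chunks_py_alt text m
  unfold stream_text_chunks_py stream_text_chunks_py_alt
  set s := text.toList with hs
  by_cases hnil : PySem.Chars.split₀ s = []
  · have hstrip : PySem.Chars.strip s = [] :=
      (pv_strip_eq_nil_iff s).mpr ((pv_split₀_eq_nil_iff s).mp hnil)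
    simp [hstrip, hnil, pvOuter]
  · have hstrip : PySem.Chars.strip s ≠ [] := by
      intro h
      exact hnil ((pv_split₀_eq_nil_iff s).mpr ((pv_strip_eq_nil_iff s).mp h))
    have hwords : PySem.Chars.split₀ (PySem.Chars.strip s) = PySem.Chars.split₀ s :=
      pv_split₀_strip s
    rcases hw : PySem.Chars.split₀ s with _ | ⟨w, rest⟩
    · exact absurd hw hnil
    · have hall : ∀ v ∈ PySem.Chars.split₀ s, v ≠ [] := pv_words_ne_nil s
      rw [hw] at hall
      have hwne : w ≠ [] := hall w (by simp)
      have hrest : ∀ v ∈ rest, v ≠ [] := fun v hv => hall v (List.mem_cons_of_mem _ hv)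
      simp only [hstrip, hwords, hw, if_neg hstrip, ite_false]
      have hA1 : pvStepA m ([], []) w = ([], w) := by
        simp only [pvStepA, ite_true]
        split_ifs <;> rfl
      simp only [List.foldl_cons, hA1]
      have hb := pv_bridge m rest [] [w] (by simp) (by simpa using hwne) hrest
      simp only [pvBump, ite_true, List.nil_append, PySem.Chars.join_singleton] at hb
      rw [hb]
      have hru : pvOuter m [] (w :: rest)
          = pvOuter m (pvBump [] ++ [PySem.Chars.join [' ']
              (w :: (pvExtend m (w.length : Int) rest).1)]) (pvExtend m (w.length : Int) rest).2 := by
        rw [pvOuter]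
      rw [hru]
      simp [pvBump]
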